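-- pv_equiv track=rewrite | github.com/Haddox/score_monomeric_designs | scripts/scoring_utils.py | compute_abego_counts_in_loops
-- ===== SOURCE A (Python) =====
-- import itertools
--
-- def compute_abego_counts_in_loops(abego_string, dssp_string):
--     """
--     Compute counts for ABEGO 1-, 2-, and 3-mers in loops
--
--     Args:
--         *abego_string*: a string of the per-residue ABEGO types
--             for each residue in the protein (upper case)
--         *dssp_string*: a string of per-residue secondary structure
--             for each residue in the protein (upper case; H=helix,
--             E=strand, L=loop)
--
--     Returns:
--         A dictionary with all possible ABEGO 1-, 2-, and 3-mer
--             sequences as keys and counts of these sequences in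
--             loops as values
--
--     Code for doctest:
--     >>> abego_string = 'AGA'
--     >>> dssp_string = 'ELL'
--     >>> d = compute_abego_counts_in_loops(abego_string, dssp_string)
--     >>> (d['G'], d['A'], d['GA'])
--     (1, 1, 1)
--     >>> sum(d.values())
--     3
--     >>> abego_string = 'BAGBBEBBB'
--     >>> dssp_string =  'LELLLHLLH'
--     >>> d = compute_abego_counts_in_loops(abego_string, dssp_string)
--     >>> (d['A'], d['B'], d['G'], d['GB'], d['BB'], d['GBB'])
--     (0, 5, 1, 1, 2, 1)
--     >>> sum(d.values())
--     10
--     """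
--
--     # Initiate a dictionary with all possible 1mer, 2mer, and 3mer ABEGO
--     # sequences
--     abego_1mers = list('ABEGO')
--     abego_2mers = [
--         ''.join(abego_2mer) for abego_2mer in
--         list(itertools.product(abego_1mers, abego_1mers, repeat=1))
--     ]
--     abego_3mers = [
--         ''.join(abego_3mer) for abego_3mer in
--         list(itertools.product(abego_1mers, abego_2mers, repeat=1))
--     ]
--     abego_counts = {
--         ''.join(list(abego_type)) : 0
--         for abego_type in abego_1mers + abego_2mers + abego_3mers
--     }
--
--     # Go through sequence and record counts of 1mer, 2mer, and 3mer
--     # ABEGOs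
--     abego_string = abego_string.upper()
--     dssp_string = dssp_string.upper()
--     assert len(abego_string) == len(dssp_string)
--     for i in range(len(abego_string)):
--
--         # Record data for 1mers if this position is in a loop
--         if dssp_string[i] == 'L':
--             abego_type_1mer = abego_string[i]
--             abego_counts[abego_type_1mer] += 1
--         else:
--             continue
--
--         # Record data for 2mers if the next position is in a loop
--         if (i+1 >= len(abego_string)):
--             continue
--         if dssp_string[i+1] == 'L':
--             abego_type_2mer = abego_string[i:i+2]
--             abego_counts[abego_type_2mer] += 1
--         else:
--             continue
--
--         # Record data for 3mers if the position after next is in a loop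
--         if (i+2 >= len(abego_string)):
--             continue
--         if dssp_string[i+2] == 'L':
--             abego_type_3mer = abego_string[i:i+3]
--             abego_counts[abego_type_3mer] += 1
--     return abego_counts
-- ===== SOURCE B (Python) =====
-- import itertools
--
-- def compute_abego_counts_in_loops(abego_string, dssp_string):
--     abego_string = abego_string.upper()
--     dssp_string = dssp_string.upper()
--     assert len(abego_string) == len(dssp_string)
--     counts = {''.join(p): 0 for k in (1, 2, 3)
--               for p in itertools.product('ABEGO', repeat=k)}
--     # Maximal runs of consecutive loop ('L') positions, as ABEGO segments
--     segments = [
--         ''.join(abego for abego, ss in group)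
--         for is_loop, group in itertools.groupby(
--             zip(abego_string, dssp_string), key=lambda pair: pair[1] == 'L')
--         if is_loop
--     ]
--     # Slide windows of lengths 1, 2 and 3 over each loop segment
--     for segment in segments:
--         for start in range(len(segment)):
--             for k in (1, 2, 3):
--                 if start + k <= len(segment):
--                     counts[segment[start:start + k]] += 1
--     return counts
-- ===== Notes on version B (the rewrite author's own statement) =====
-- stated objective: alternative
-- what changed: B first decomposes the structure into the maximal loop segments (itertools.groupby over the zipped strings) and then slides windows of lengths 1/2/3 over each segment, instead of A's single per-position cascade of nested length/next-residue conditionals mutating the dict in place.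
import Mathlib
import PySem

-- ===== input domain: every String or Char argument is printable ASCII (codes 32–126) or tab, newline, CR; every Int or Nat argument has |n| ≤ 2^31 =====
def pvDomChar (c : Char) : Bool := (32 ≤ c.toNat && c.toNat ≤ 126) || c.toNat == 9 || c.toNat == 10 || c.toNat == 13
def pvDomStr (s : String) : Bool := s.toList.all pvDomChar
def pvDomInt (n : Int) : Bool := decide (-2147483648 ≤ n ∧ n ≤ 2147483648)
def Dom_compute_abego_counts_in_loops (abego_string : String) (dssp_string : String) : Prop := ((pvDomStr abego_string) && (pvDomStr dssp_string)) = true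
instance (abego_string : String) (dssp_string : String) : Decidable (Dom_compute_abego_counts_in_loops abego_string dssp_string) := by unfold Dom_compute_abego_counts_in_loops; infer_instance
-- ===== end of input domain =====

-- B decomposes the input into maximal loop segments first (groupby over the zipped strings)
-- and then slides 1/2/3-windows over each segment, instead of A's per-position conditional
-- cascade (objective: alternative; equal cost).

-- ===== PORT A =====
-- helpers naming A's intermediate values (list('ABEGO'), the itertools.product key lists,
-- the zero-initialised dict, and the body of A's for-loop)
def pvA_1mers : List Char := "ABEGO".toList
def pvA_2mers : List String := pvA_1mers.flatMap (fun a => pvA_1mers.map (fun b => String.ofList [a, b]))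
def pvA_3mers : List String := pvA_1mers.flatMap (fun a => pvA_2mers.map (fun s => String.ofList (a :: s.toList)))
def pvA_keys : List String := pvA_1mers.map (fun c => String.ofList [c]) ++ pvA_2mers ++ pvA_3mers
def pvA_init : PySem.Dict String Int := pvA_keys.foldl (fun d k => d.insert k 0) PySem.Dict.empty
-- Python's 'abego_counts[key] += 1' raises KeyError when the key is absent (those inputs are
-- outside Pre_); on admitted inputs every key is present and Dict.modify is exact.
def pvA_step (a dssp : String) (n : Int) (d : PySem.Dict String Int) (i : Int) : PySem.Dict String Int :=
  if PySem.Str.pyGet? dssp i = some 'L' then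
    let d1 := d.modify (String.ofList [(PySem.Str.pyGet? a i).getD ' ']) 0 (· + 1)
    if n ≤ i + 1 then d1
    else if PySem.Str.pyGet? dssp (i + 1) = some 'L' then
      let d2 := d1.modify (PySem.Str.slice a (some i) (some (i + 2))) 0 (· + 1)
      if n ≤ i + 2 then d2
      else if PySem.Str.pyGet? dssp (i + 2) = some 'L' then
        d2.modify (PySem.Str.slice a (some i) (some (i + 3))) 0 (· + 1)
      else d2
    else d1
  else d

def compute_abego_counts_in_loops (abego_string : String) (dssp_string : String) : List (String × Int) :=
  let a := PySem.Str.upper abego_string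
  let dssp := PySem.Str.upper dssp_string
  let n : Int := PySem.Str.len a
  ((PySem.List.pyRange 0 n 1).foldl (pvA_step a dssp n) pvA_init).items

-- ===== PORT B =====
-- itertools.product('ABEGO', repeat=k) (lexicographic tuples, as char lists)
def pvB_product (cs : List Char) : Nat → List (List Char)
  | 0 => [[]]
  | k + 1 => cs.flatMap (fun c => (pvB_product cs k).map (c :: ·))
def pvB_keys : List String :=
  ([1, 2, 3] : List Nat).flatMap (fun k => (pvB_product "ABEGO".toList k).map String.ofList)
def pvB_init : PySem.Dict String Int := pvB_keys.foldl (fun d k => d.insert k 0) PySem.Dict.empty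
-- itertools.groupby(zip(a, d), key=snd == 'L') keeping the True groups and joining their
-- first components: maximal runs of consecutive loop positions, as ABEGO char segments
def pvB_segs : List (Char × Char) → List (List Char)
  | [] => []
  | p :: rest =>
    if p.2 == 'L' then
      ((p :: rest.takeWhile (fun q => q.2 == 'L')).map Prod.fst) ::
        pvB_segs (rest.dropWhile (fun q => q.2 == 'L'))
    else pvB_segs rest
termination_by z => z.length
decreasing_by
· exact Nat.lt_succ_of_le (List.length_dropWhile_le _ _)
· simp

def compute_abego_counts_in_loops_alt (abego_string : String) (dssp_string : String) : List (String × Int) :=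
  let a := PySem.Str.upper abego_string
  let dssp := PySem.Str.upper dssp_string
  let segments := pvB_segs (a.toList.zip dssp.toList)
  (segments.foldl (fun dict seg =>
    (List.range seg.length).foldl (fun dict st =>
      ([1, 2, 3] : List Nat).foldl (fun dict k =>
        if st + k ≤ seg.length then
          dict.modify (String.ofList ((seg.drop st).take k)) 0 (· + 1)
        else dict) dict) dict) pvB_init).items

-- ===== PRECONDITION & SPEC =====
-- Pre_ excludes exactly the inputs where the Python A raises: unequal lengths (AssertionError)
-- and inputs with a non-ABEGO character (after .upper()) at a loop ('L') position (KeyError).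
def Pre_compute_abego_counts_in_loops (abego_string : String) (dssp_string : String) : Prop :=
  abego_string.toList.length = dssp_string.toList.length ∧
  ∀ p ∈ abego_string.toList.zip dssp_string.toList,
    PySem.Chars.upperChar p.2 = 'L' → PySem.Chars.upperChar p.1 ∈ (['A', 'B', 'E', 'G', 'O'] : List Char)
instance (abego_string : String) (dssp_string : String) : Decidable (Pre_compute_abego_counts_in_loops abego_string dssp_string) := by unfold Pre_compute_abego_counts_in_loops; infer_instance

def pvWitness_compute_abego_counts_in_loops : String × String := ("AGA", "ELL")

def Spec_compute_abego_counts_in_loops (abego_string : String) (dssp_string : String) (out : List (String × Int)) : Prop := out = compute_abego_counts_in_loops_alt abego_string dssp_string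
instance (abego_string : String) (dssp_string : String) (out : List (String × Int)) : Decidable (Spec_compute_abego_counts_in_loops abego_string dssp_string out) := by unfold Spec_compute_abego_counts_in_loops; infer_instance

-- ===== CLAIM (what is proved, stated in full; the proofs are below) =====
def Claim_equal_compute_abego_counts_in_loops : Prop := ∀ (abego_string : String) (dssp_string : String), Dom_compute_abego_counts_in_loops abego_string dssp_string → Pre_compute_abego_counts_in_loops abego_string dssp_string → Spec_compute_abego_counts_in_loops abego_string dssp_string (compute_abego_counts_in_loops abego_string dssp_string)

-- ===== LEMMAS AND PROOFS =====

def pvMod (d : PySem.Dict String Int) (k : String) : PySem.Dict String Int := d.modify k 0 (· + 1)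

-- the list of window strings A's loop body records at position i
def pvEmit (a dssp : String) (n : Int) (i : Int) : List String :=
  if PySem.Str.pyGet? dssp i = some 'L' then
    String.ofList [(PySem.Str.pyGet? a i).getD ' '] ::
      (if n ≤ i + 1 then []
       else if PySem.Str.pyGet? dssp (i + 1) = some 'L' then
         PySem.Str.slice a (some i) (some (i + 2)) ::
           (if n ≤ i + 2 then []
            else if PySem.Str.pyGet? dssp (i + 2) = some 'L' then
              [PySem.Str.slice a (some i) (some (i + 3))]
            else [])
       else [])
  else []

-- the same emission over the zipped char list (char-list windows)
def pvEmitZ (z : List (Char × Char)) (m : Nat) : List (List Char) :=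
  if (z[m]?.map Prod.snd) = some 'L' then
    ((z.drop m).take 1).map Prod.fst ::
      (if (z[m + 1]?.map Prod.snd) = some 'L' then
        ((z.drop m).take 2).map Prod.fst ::
          (if (z[m + 2]?.map Prod.snd) = some 'L' then [((z.drop m).take 3).map Prod.fst] else [])
       else [])
  else []

-- the windows B records at offset st of a segment
def pvWin (s : List Char) (st : Nat) : List (List Char) :=
  ([1, 2, 3] : List Nat).filterMap
    (fun k => if st + k ≤ s.length then some ((s.drop st).take k) else none)

theorem pv_step_eq (a dssp : String) (n : Int) (d : PySem.Dict String Int) (i : Int) :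
    pvA_step a dssp n d i = (pvEmit a dssp n i).foldl pvMod d := by
  unfold pvA_step pvEmit
  split_ifs <;> simp [List.foldl, pvMod]

theorem pv_Aloop_eq (a dssp : String) (n : Int) (l : List Int) (d : PySem.Dict String Int) :
    l.foldl (pvA_step a dssp n) d = (l.flatMap (pvEmit a dssp n)).foldl pvMod d := by
  rw [List.foldl_flatMap]
  exact PySem.List.foldl_congr_mem _ _ _ _ (fun acc x _ => pv_step_eq a dssp n acc x)

set_option maxRecDepth 40000 in
theorem pv_keys_eq : pvA_keys = pvB_keys := by decide

theorem pv_init_eq : pvA_init = pvB_init := by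
  unfold pvA_init pvB_init; rw [pv_keys_eq]

theorem pv_upper_toList (s : String) :
    (PySem.Str.upper s).toList = s.toList.map PySem.Chars.upperChar := by
  rw [PySem.Str.toList_upper]; rfl

theorem pv_slice_ofList (s : String) (m : Nat) (k : Int) (hk : 0 ≤ k) :
    PySem.Str.slice s (some (m : Int)) (some ((m : Int) + k)) =
      String.ofList ((s.toList.drop m).take k.toNat) := by
  apply String.toList_inj.mp
  rw [PySem.Str.toList_slice]
  show PySem.List.slice _ _ _ = _
  rw [PySem.List.slice_toNat _ (by positivity) (by positivity), String.toList_ofList]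
  congr 1
  omega

theorem pv_zip_getElem? (aL dL : List Char) (h : aL.length = dL.length) (i : Nat) :
    (aL.zip dL)[i]? = if hi : i < aL.length then some (aL[i], dL[i]'(h ▸ hi)) else none := by
  split_ifs with hi
  · rw [List.getElem?_eq_getElem (by simp [List.length_zip]; omega)]
    simp [List.getElem_zip]
  · rw [List.getElem?_eq_none_iff]
    simp [List.length_zip]; omega

theorem pv_zip_window (aL dL : List Char) (h : aL.length = dL.length) (m k : Nat) :
    (((aL.zip dL).drop m).take k).map Prod.fst = (aL.drop m).take k := by
  have : (aL.zip dL).drop m = (aL.drop m).zip (dL.drop m) := by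
    simp [List.zip, List.drop_zipWith]
  rw [this]
  have : ((aL.drop m).zip (dL.drop m)).take k = ((aL.drop m).take k).zip ((dL.drop m).take k) := by
    simp [List.zip, List.take_zipWith]
  rw [this]
  exact List.map_fst_zip (by simp; omega)

theorem pv_emit_eq_z (a d : String) (h : a.toList.length = d.toList.length)
    (m : Nat) (hm : m < a.toList.length) :
    pvEmit a d (PySem.Str.len a) (m : Int) =
      (pvEmitZ (a.toList.zip d.toList) m).map String.ofList := by
  have hmd : m < d.toList.length := h ▸ hm
  have c1 : ((m : Int) + 1) = ((m + 1 : Nat) : Int) := by push_cast; ring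
  have c2 : ((m : Int) + 2) = ((m + 2 : Nat) : Int) := by push_cast; ring
  unfold pvEmit pvEmitZ
  rw [pv_slice_ofList a m 2 (by norm_num), pv_slice_ofList a m 3 (by norm_num),
      c1, c2, PySem.Str.pyGet?_natCast, PySem.Str.pyGet?_natCast, PySem.Str.pyGet?_natCast,
      PySem.Str.pyGet?_natCast, PySem.Str.len_eq,
      pv_zip_getElem? _ _ h m, pv_zip_getElem? _ _ h (m+1), pv_zip_getElem? _ _ h (m+2),
      pv_zip_window _ _ h m 1, pv_zip_window _ _ h m 2, pv_zip_window _ _ h m 3]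
  have hg : a.toList[m]? = some a.toList[m] := List.getElem?_eq_getElem hm
  have hgd : d.toList[m]? = some d.toList[m] := List.getElem?_eq_getElem hmd
  have h1 : (a.toList.drop m).take ((1:Nat)) = [a.toList[m]] := by
    rw [List.drop_eq_getElem_cons hm]; rfl
  have hll : a.toList.length = a.length := by simp
  rw [hg, hgd, dif_pos hm]
  by_cases hb1 : m + 1 < a.toList.length
  · rw [dif_pos hb1]
    have hg1 : d.toList[m+1]? = some (d.toList[m+1]'(h ▸ hb1)) := List.getElem?_eq_getElem (h ▸ hb1)
    rw [hg1]
    by_cases hb2 : m + 2 < a.toList.length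
    · rw [dif_pos hb2]
      have hg2 : d.toList[m+2]? = some (d.toList[m+2]'(h ▸ hb2)) := List.getElem?_eq_getElem (h ▸ hb2)
      rw [hg2]
      have hue1 : ¬ ((a.length : Int) ≤ (m:Int) + 1) := by omega
      have hue2 : ¬ ((a.length : Int) ≤ (m:Int) + 2) := by omega
      by_cases e1 : d.toList[m] = 'L' <;> by_cases e2 : d.toList[m+1]'(h ▸ hb1) = 'L' <;>
        by_cases e3 : d.toList[m+2]'(h ▸ hb2) = 'L' <;>
        simp [e1, e2, e3, hue1, hue2, h1]
    · rw [dif_neg hb2]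
      have hue1 : ¬ ((a.length : Int) ≤ (m:Int) + 1) := by omega
      have hle2 : ((a.length : Int) ≤ (m:Int) + 2) := by omega
      by_cases e1 : d.toList[m] = 'L' <;> by_cases e2 : d.toList[m+1]'(h ▸ hb1) = 'L' <;>
        simp [e1, e2, hue1, hle2, h1]
  · rw [dif_neg hb1]
    have hle1 : ((a.length : Int) ≤ (m:Int) + 1) := by omega
    by_cases e1 : d.toList[m] = 'L' <;> simp [e1, hle1, h1]

theorem pvWin_eq (s : List Char) (st : Nat) : pvWin s st =
    (if st + 1 ≤ s.length then [(s.drop st).take 1] else []) ++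
    (if st + 2 ≤ s.length then [(s.drop st).take 2] else []) ++
    (if st + 3 ≤ s.length then [(s.drop st).take 3] else []) := by
  unfold pvWin
  by_cases h1 : st + 1 ≤ s.length <;> by_cases h2 : st + 2 ≤ s.length <;>
    by_cases h3 : st + 3 ≤ s.length <;> simp [List.filterMap, h1, h2, h3]

theorem pv_emitZ_cons (p : Char × Char) (z : List (Char × Char)) (m : Nat) :
    pvEmitZ (p :: z) (m + 1) = pvEmitZ z m := by
  simp [pvEmitZ]

theorem pv_emitZ_append (s q : List (Char × Char)) (m : Nat) :
    pvEmitZ (s ++ q) (s.length + m) = pvEmitZ q m := by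
  induction s with
  | nil => simp
  | cons p s ih =>
    have he : (p :: s).length + m = (s.length + m) + 1 := by simp; omega
    rw [he, List.cons_append, pv_emitZ_cons, ih]

theorem pv_emitZ_run (seg q : List (Char × Char)) (m : Nat) (hm : m < seg.length)
    (hseg : ∀ p ∈ seg, p.2 = 'L') (hq : ∀ p ∈ q.head?, ¬ p.2 = 'L') :
    pvEmitZ (seg ++ q) m = pvWin (seg.map Prod.fst) m := by
  have hcIn : ∀ i, i < seg.length → ((seg ++ q)[i]?.map Prod.snd) = some 'L' := by
    intro i hi
    rw [List.getElem?_append_left hi, List.getElem?_eq_getElem hi]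
    simp [hseg _ (List.getElem_mem hi)]
  have hcEnd : ¬ ((seg ++ q)[seg.length]?.map Prod.snd) = some 'L' := by
    rw [List.getElem?_append_right (le_refl _)]
    simp only [Nat.sub_self]
    cases hq0 : q[0]? with
    | none => simp
    | some p =>
      have hmem : p ∈ q.head? := by simp [List.head?_eq_getElem?, hq0]
      simp [hq p hmem]
  have hwin : ∀ k, m + k ≤ seg.length →
      (((seg ++ q).drop m).take k).map Prod.fst = ((seg.map Prod.fst).drop m).take k := by
    intro k hk
    rw [List.drop_append_of_le_length (le_of_lt hm),
        List.take_append_of_le_length (by rw [List.length_drop]; omega),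
        ← List.map_drop, ← List.map_take]
  have hlen : (seg.map Prod.fst).length = seg.length := by simp
  rw [pvWin_eq]
  unfold pvEmitZ
  rw [if_pos (hcIn m hm), hlen]
  by_cases h2 : m + 2 ≤ seg.length
  · by_cases h3 : m + 3 ≤ seg.length
    · rw [if_pos (hcIn (m+1) (by omega)), if_pos (hcIn (m+2) (by omega)),
          if_pos (by omega : m + 1 ≤ seg.length), if_pos h2, if_pos h3,
          hwin 1 (by omega), hwin 2 (by omega), hwin 3 (by omega)]
      simp
    · have he2 : m + 2 = seg.length := by omega
      rw [if_pos (hcIn (m+1) (by omega)), if_neg (he2 ▸ hcEnd),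
          if_pos (by omega : m + 1 ≤ seg.length), if_pos h2, if_neg h3,
          hwin 1 (by omega), hwin 2 (by omega)]
      simp
  · have he1 : m + 1 = seg.length := by omega
    rw [if_neg (he1 ▸ hcEnd), if_pos (by omega : m + 1 ≤ seg.length), if_neg h2,
        if_neg (by omega : ¬ m + 3 ≤ seg.length), hwin 1 (by omega)]
    simp

theorem pv_main (z : List (Char × Char)) :
    (List.range z.length).flatMap (pvEmitZ z) =
      (pvB_segs z).flatMap (fun s => (List.range s.length).flatMap (pvWin s)) := by
  match z with
  | [] => simp [pvB_segs]
  | p :: rest =>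
    by_cases hp : p.2 = 'L'
    · -- segment case
      set t := rest.takeWhile (fun q => q.2 == 'L') with ht
      set q := rest.dropWhile (fun q => q.2 == 'L') with hqd
      have hq_le : q.length ≤ rest.length := List.length_dropWhile_le _ _
      have hrest : rest = t ++ q := (List.takeWhile_append_dropWhile).symm
      have hz : p :: rest = (p :: t) ++ q := by rw [hrest]; rfl
      have hseg : ∀ x ∈ p :: t, x.2 = 'L' := by
        intro x hx
        rcases List.mem_cons.mp hx with h | h
        · subst h; exact hp
        · simpa using List.mem_takeWhile_imp h
      have hqh : ∀ x ∈ q.head?, ¬ x.2 = 'L' := by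
        intro x hx
        have h := List.head?_dropWhile_not (fun q => q.2 == 'L') rest
        rw [← hqd, Option.mem_def.mp hx] at h
        simpa using h
      have hps : pvB_segs (p :: rest) = ((p :: t).map Prod.fst) :: pvB_segs q := by
        rw [pvB_segs]
        simp [hp, ← ht, ← hqd]
      rw [hps, List.flatMap_cons]
      conv_lhs => rw [hz]
      have hlen : ((p :: t) ++ q).length = (p :: t).length + q.length := by simp; omega
      rw [hlen, List.range_add, List.flatMap_append, List.flatMap_map]
      have h1 : (List.range (p :: t).length).flatMap (pvEmitZ ((p :: t) ++ q)) =
          (List.range ((p :: t).map Prod.fst).length).flatMap (pvWin ((p :: t).map Prod.fst)) := by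
        rw [List.length_map]
        refine List.flatMap_congr (fun m hm => ?_)
        exact pv_emitZ_run (p :: t) q m (List.mem_range.mp hm) hseg hqh
      have h2 : (List.range q.length).flatMap (fun m => pvEmitZ ((p :: t) ++ q) ((p :: t).length + m)) =
          (List.range q.length).flatMap (pvEmitZ q) := by
        refine List.flatMap_congr (fun m _ => ?_)
        exact pv_emitZ_append (p :: t) q m
      rw [h1, h2, pv_main q]
    · -- skip case
      have hps : pvB_segs (p :: rest) = pvB_segs rest := by
        rw [pvB_segs]
        simp [hp]
      rw [hps, ← (by simp : rest.length + 1 = (p :: rest).length), List.range_succ_eq_map,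
          List.flatMap_cons]
      have h0 : pvEmitZ (p :: rest) 0 = [] := by simp [pvEmitZ, hp]
      rw [h0, List.nil_append, List.flatMap_map]
      have hsh : (fun a => pvEmitZ (p :: rest) a.succ) = pvEmitZ rest := by
        funext m; exact pv_emitZ_cons p rest m
      rw [hsh, pv_main rest]
termination_by z.length
decreasing_by
· simpa using Nat.lt_succ_of_le hq_le
· simp

theorem pv_fold3 (dict : PySem.Dict String Int) (seg : List Char) (st : Nat) :
    ([1, 2, 3] : List Nat).foldl (fun dict k =>
        if st + k ≤ seg.length then
          dict.modify (String.ofList ((seg.drop st).take k)) 0 (· + 1)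
        else dict) dict
      = (pvWin seg st).foldl (fun dict w => pvMod dict (String.ofList w)) dict := by
  unfold pvWin
  simp only [List.filterMap, List.foldl]
  by_cases h1 : st + 1 ≤ seg.length <;> by_cases h2 : st + 2 ≤ seg.length <;>
    by_cases h3 : st + 3 ≤ seg.length <;>
    simp [h1, h2, h3, pvMod, List.foldl]

-- ===== VERDICT (by name: the statement is the Claim_ definition above) =====
set_option maxHeartbeats 1000000 in
theorem compute_abego_counts_in_loops_spec : Claim_equal_compute_abego_counts_in_loops := by
  intro ab ds _ hPre
  obtain ⟨hlen, -⟩ := hPre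
  unfold Spec_compute_abego_counts_in_loops
  unfold compute_abego_counts_in_loops compute_abego_counts_in_loops_alt
  dsimp only
  set a := PySem.Str.upper ab with ha
  set d := PySem.Str.upper ds with hd
  have hlen' : a.toList.length = d.toList.length := by
    rw [pv_upper_toList, pv_upper_toList]; simpa using hlen
  -- A side: fold over the flat list of windows A emits position by position
  rw [pv_Aloop_eq]
  have hA : (PySem.List.pyRange 0 (PySem.Str.len a) 1).flatMap (pvEmit a d (PySem.Str.len a)) =
      ((List.range (a.toList.zip d.toList).length).flatMap
        (pvEmitZ (a.toList.zip d.toList))).map String.ofList := by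
    rw [PySem.List.pyRange_one]
    have hn : ((PySem.Str.len a) - 0).toNat = a.toList.length := by
      rw [PySem.Str.len_eq]; simp
    have hzl : (a.toList.zip d.toList).length = a.toList.length := by
      rw [List.length_zip]; omega
    rw [hn, hzl, List.flatMap_map, List.map_flatMap]
    refine List.flatMap_congr (fun m hm => ?_)
    have hc : ((0 : Int) + (m : Int)) = (m : Int) := by ring
    rw [hc]
    exact pv_emit_eq_z a d hlen' m (List.mem_range.mp hm)
  rw [hA, pv_main]
  -- B side: flatten the nested window folds into one fold over the same flat list
  have hseg1 : ∀ (seg : List Char) (dict : PySem.Dict String Int),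
      (List.range seg.length).foldl (fun dict st =>
        ([1, 2, 3] : List Nat).foldl (fun dict k =>
          if st + k ≤ seg.length then
            dict.modify (String.ofList ((seg.drop st).take k)) 0 (· + 1)
          else dict) dict) dict
      = ((List.range seg.length).flatMap (pvWin seg)).foldl
          (fun dict w => pvMod dict (String.ofList w)) dict := by
    intro seg dict
    rw [List.foldl_flatMap]
    exact PySem.List.foldl_congr_mem _ _ _ _ (fun acc st _ => pv_fold3 acc seg st)
  have hB : (pvB_segs (a.toList.zip d.toList)).foldl (fun dict seg =>
      (List.range seg.length).foldl (fun dict st =>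
        ([1, 2, 3] : List Nat).foldl (fun dict k =>
          if st + k ≤ seg.length then
            dict.modify (String.ofList ((seg.drop st).take k)) 0 (· + 1)
          else dict) dict) dict) pvB_init
      = ((pvB_segs (a.toList.zip d.toList)).flatMap
          (fun s => (List.range s.length).flatMap (pvWin s))).foldl
            (fun dict w => pvMod dict (String.ofList w)) pvB_init := by
    rw [List.foldl_flatMap]
    exact PySem.List.foldl_congr_mem _ _ _ _ (fun acc s _ => hseg1 s acc)
  rw [hB, List.foldl_map, pv_init_eq]
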